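-- pv_equiv track=rewrite | github.com/DooHongKm/Algorithm_Solutions | 프로그래머스/2/389479. 서버 증설 횟수/서버 증설 횟수.py | solution
-- ===== SOURCE A (Python) =====
-- def solution(players, m, k):
--     result = 0
--     length = len(players)
--
--     for i, player in enumerate(players):
--         add = player // m
--         if add > 0:
--             result += add
--             for j in range(i + 1, min(length, i + k)):
--                 players[j] -= add * m
--
--     return result
-- ===== SOURCE B (Python) =====
-- def solution(players, m, k):
--     # O(n) one-pass sliding window: 'active' = servers still covering this hour,
--     # 'adds' records each hour's addition so it can expire k hours later.
--     # Note: A mutates `players` in place; B does not (return value is the same).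
--     result = 0
--     active = 0
--     adds = []
--     for i, p in enumerate(players):
--         if k > 1 and i >= k:
--             active -= adds[i - k]
--         add = p // m - active
--         c = max(add, 0)
--         if add > 0:
--             result += add
--             if k > 1:
--                 active += add
--         adds.append(c)
--     return result
-- ===== Notes on version B (the rewrite author's own statement) =====
-- stated objective: faster
-- what changed: Replaces A's in-place subtraction over the next k-1 entries at every addition (nested loop) by a single pass that keeps a sliding count of still-active servers, expiring each hour's addition k hours later via a recorded adds list.
-- outside the precondition, e.g. on solution([4], 0, 2): A raises ZeroDivisionError, B raises ZeroDivisionError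
import Mathlib
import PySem

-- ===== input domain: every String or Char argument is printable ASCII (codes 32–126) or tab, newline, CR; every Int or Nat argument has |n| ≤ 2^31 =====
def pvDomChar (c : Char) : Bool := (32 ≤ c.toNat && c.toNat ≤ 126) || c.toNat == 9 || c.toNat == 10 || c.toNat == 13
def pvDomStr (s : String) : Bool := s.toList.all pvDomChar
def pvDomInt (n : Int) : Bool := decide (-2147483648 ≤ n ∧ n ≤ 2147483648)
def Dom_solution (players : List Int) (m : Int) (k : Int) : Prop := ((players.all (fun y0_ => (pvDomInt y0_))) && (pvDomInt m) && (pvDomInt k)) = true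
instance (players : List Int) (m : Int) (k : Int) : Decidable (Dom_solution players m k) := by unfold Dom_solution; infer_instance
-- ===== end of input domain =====

-- B replaces A's O(n·k) in-place window subtraction by an O(n) sliding window of active
-- server counts with expiry; A mutates `players` in place, B does not (return value equal).

-- ===== PORT A =====
-- outer loop of A over the index list (enumerate reads the mutated list live, so by index);
-- inner loop: players[j] -= add*m over range(i+1, min(length, i+k)) (j always in range,
-- so pySetD/pyGetD are exact here)
def solutionLoopA (m k n : Int) : List Int → List Int → Int → Int
  | _, [], result => result
  | ps, i :: is, result =>
      let player := PySem.List.pyGetD ps i 0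
      let add := PySem.Int.floordiv player m
      if add > 0 then
        let ps' := (PySem.List.pyRange (i + 1) (min n (i + k)) 1).foldl
          (fun acc j => PySem.List.pySetD acc j (PySem.List.pyGetD acc j 0 - add * m)) ps
        solutionLoopA m k n ps' is (result + add)
      else
        solutionLoopA m k n ps is result

def solution (players : List Int) (m : Int) (k : Int) : Int :=
  let length : Int := players.length
  solutionLoopA m k length players (PySem.List.pyRange 0 length 1) 0

-- ===== PORT B =====
-- B's loop: state (i, adds, active, result); adds[i-k] is in range whenever k > 1 ∧ k ≤ i
def solutionLoopB (m k : Int) : List Int → Int → List Int → Int → Int → Int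
  | [], _, _, _, result => result
  | p :: rest, i, adds, active, result =>
      let active := if k > 1 ∧ k ≤ i then active - PySem.List.pyGetD adds (i - k) 0 else active
      let add := PySem.Int.floordiv p m - active
      let c := max add 0
      let result := if add > 0 then result + add else result
      let active := if add > 0 ∧ k > 1 then active + add else active
      solutionLoopB m k rest (i + 1) (adds ++ [c]) active result

def solution_alt (players : List Int) (m : Int) (k : Int) : Int :=
  solutionLoopB m k players 0 [] 0 0

-- ===== PRECONDITION & SPEC =====
-- A raises ZeroDivisionError when m = 0 and at least one player exists; excluded (B raises too).
def Pre_solution (players : List Int) (m : Int) (k : Int) : Prop := players = [] ∨ m ≠ 0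
instance (players : List Int) (m : Int) (k : Int) : Decidable (Pre_solution players m k) := by
  unfold Pre_solution; infer_instance

def pvWitness_solution : List Int × Int × Int := ([5, 1, 4], 2, 2)

def Spec_solution (players : List Int) (m : Int) (k : Int) (out : Int) : Prop := out = solution_alt players m k
instance (players : List Int) (m : Int) (k : Int) (out : Int) : Decidable (Spec_solution players m k out) := by unfold Spec_solution; infer_instance

-- ===== CLAIM (what is proved, stated in full; the proofs are below) =====
def Claim_equal_solution : Prop := ∀ (players : List Int) (m : Int) (k : Int), Dom_solution players m k → Pre_solution players m k → Spec_solution players m k (solution players m k)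

-- ===== LEMMAS AND PROOFS =====

-- sum of the elements of l with index ≥ a (all of them if a < 0)
def sumFrom (l : List Int) (a : Int) : Int := (l.drop a.toNat).sum

lemma sumFrom_nil (a : Int) : sumFrom [] a = 0 := by simp [sumFrom]

lemma sumFrom_ge (l : List Int) (a : Int) (h : (l.length : Int) ≤ a) : sumFrom l a = 0 := by
  unfold sumFrom
  rw [List.drop_eq_nil_of_le (by omega : l.length ≤ a.toNat)]
  rfl

lemma sumFrom_nonpos (l : List Int) (a b : Int) (ha : a ≤ 0) (hb : b ≤ 0) :
    sumFrom l a = sumFrom l b := by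
  unfold sumFrom
  rw [Int.toNat_of_nonpos ha, Int.toNat_of_nonpos hb]

lemma sumFrom_append (l : List Int) (x : Int) (a : Int) :
    sumFrom (l ++ [x]) a = sumFrom l a + (if a ≤ (l.length : Int) then x else 0) := by
  unfold sumFrom
  by_cases h : a ≤ (l.length : Int)
  · rw [List.drop_append_of_le_length (by omega : a.toNat ≤ l.length)]
    simp [h]
  · rw [List.drop_eq_nil_of_le (by simp; omega : (l ++ [x]).length ≤ a.toNat),
        List.drop_eq_nil_of_le (by omega : l.length ≤ a.toNat)]
    simp [h]

lemma sumFrom_pop (l : List Int) (a : Int) (h0 : 0 ≤ a) (h : a < (l.length : Int)) :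
    sumFrom l a = l.getD a.toNat 0 + sumFrom l (a + 1) := by
  unfold sumFrom
  have hlt : a.toNat < l.length := by omega
  have h1 : (a + 1).toNat = a.toNat + 1 := by omega
  rw [h1, List.drop_eq_getElem_cons hlt, List.sum_cons, List.getD_eq_getElem l 0 hlt]

-- the inner subtracting fold of A: length preserved
lemma innerA_length (r : List Int) (v : Int) (ps : List Int) :
    (r.foldl (fun acc j => PySem.List.pySetD acc j (PySem.List.pyGetD acc j 0 - v)) ps).length
      = ps.length := by
  induction r generalizing ps with
  | nil => rfl
  | cons j r ih => simp [List.foldl_cons, ih, PySem.List.length_pySetD]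

-- the inner subtracting fold of A: pointwise value
lemma innerA_getD (b v : Int) : ∀ (a : Int), 0 ≤ a → ∀ (ps : List Int) (jn : Nat),
    ((PySem.List.pyRange a b 1).foldl
        (fun acc j => PySem.List.pySetD acc j (PySem.List.pyGetD acc j 0 - v)) ps).getD jn 0
      = if a ≤ (jn : Int) ∧ (jn : Int) < b ∧ jn < ps.length
          then ps.getD jn 0 - v else ps.getD jn 0 := by
  intro a
  induction hn : (b - a).toNat generalizing a with
  | zero =>
    intro ha ps jn
    rw [PySem.List.pyRange_one_eq_nil (by omega)]
    simp only [List.foldl_nil]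
    have : ¬ (a ≤ (jn : Int) ∧ (jn : Int) < b ∧ jn < ps.length) := by omega
    simp [this]
  | succ n ih =>
    intro ha ps jn
    rw [PySem.List.pyRange_one_cons (by omega : a < b)]
    simp only [List.foldl_cons]
    rw [ih (a + 1) (by omega) (by omega)]
    rw [PySem.List.pySetD_of_nonneg ps _ ha]
    have hlen : (ps.set a.toNat (PySem.List.pyGetD ps a 0 - v)).length = ps.length := by simp
    rw [hlen]
    by_cases hja : jn = a.toNat
    · subst hja
      by_cases hin : a.toNat < ps.length
      · have hget : (ps.set a.toNat (PySem.List.pyGetD ps a 0 - v)).getD a.toNat 0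
            = ps.getD a.toNat 0 - v := by
          rw [PySem.List.pyGetD_of_nonneg ps _ ha]
          simp [List.getD, hin]
        have hc1 : ¬ ((a + 1 : Int) ≤ ((a.toNat : Nat) : Int) ∧ ((a.toNat : Nat) : Int) < b ∧ a.toNat < ps.length) := by omega
        have hc2 : (a ≤ ((a.toNat : Nat) : Int) ∧ ((a.toNat : Nat) : Int) < b ∧ a.toNat < ps.length) :=
          ⟨by omega, by omega, hin⟩
        rw [if_neg hc1, if_pos hc2]
        exact hget
      · have hset : ps.set a.toNat (PySem.List.pyGetD ps a 0 - v) = ps :=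
          List.set_eq_of_length_le (by omega)
        rw [hset]
        have hc1 : ¬ ((a + 1 : Int) ≤ ((a.toNat : Nat) : Int) ∧ ((a.toNat : Nat) : Int) < b ∧ a.toNat < ps.length) := by omega
        have hc2 : ¬ (a ≤ ((a.toNat : Nat) : Int) ∧ ((a.toNat : Nat) : Int) < b ∧ a.toNat < ps.length) := by omega
        rw [if_neg hc1, if_neg hc2]
    · have hget : (ps.set a.toNat (PySem.List.pyGetD ps a 0 - v)).getD jn 0 = ps.getD jn 0 := by
        simp [List.getD, List.getElem?_set_ne (by omega : a.toNat ≠ jn)]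
      rw [hget]
      have : ((a + 1 : Int) ≤ (jn : Int) ∧ (jn : Int) < b ∧ jn < ps.length)
           ↔ (a ≤ (jn : Int) ∧ (jn : Int) < b ∧ jn < ps.length) := by omega
      simp only [this]

lemma fdiv_sub_mul (a c b : Int) (h : b ≠ 0) : Int.fdiv (a - b * c) b = Int.fdiv a b - c := by
  have := Int.add_mul_fdiv_right a (-c) h
  have h2 : a + -c * b = a - b * c := by ring
  rw [h2] at this
  omega

-- main loop invariant: A at index i on the mutated list ps equals B on the original suffix rest
lemma main_loop (m k : Int) (hm : m ≠ 0) :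
    ∀ (rest : List Int) (i : Nat) (ps adds : List Int) (active res n : Int),
    n = (i : Int) + rest.length →
    ps.length = i + rest.length →
    adds.length = i →
    (∀ d : Nat, d < rest.length →
        ps.getD (i + d) 0 = rest.getD d 0 - m * sumFrom adds ((i : Int) + d + 1 - k)) →
    active = (if k > 1 then sumFrom adds ((i : Int) - k) else 0) →
    solutionLoopA m k n ps (PySem.List.pyRange (i : Int) n 1) res
      = solutionLoopB m k rest (i : Int) adds active res := by
  intro rest
  induction rest with
  | nil =>
    intro i ps adds active res n hn _ _ _ _
    rw [PySem.List.pyRange_one_eq_nil (by simp at hn; omega)]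
    rfl
  | cons p rest ih =>
    intro i ps adds active res n hn hlen hadds hrest hact
    have hin : (i : Int) < n := by simp at hn; omega
    rw [PySem.List.pyRange_one_cons hin]
    set w : Int := sumFrom adds ((i : Int) + 1 - k) with hw
    have hread : PySem.List.pyGetD ps (i : Int) 0 = p - m * w := by
      rw [PySem.List.pyGetD_of_nonneg ps _ (by omega : (0:Int) ≤ (i : Int))]
      have h0 := hrest 0 (by simp)
      simpa using h0
    have hactpost :
        (if k > 1 ∧ k ≤ (i : Int) then active - PySem.List.pyGetD adds ((i : Int) - k) 0 else active)
          = w := by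
      by_cases hk1 : k > 1
      · by_cases hki : k ≤ (i : Int)
        · rw [if_pos ⟨hk1, hki⟩, hact, if_pos hk1]
          rw [PySem.List.pyGetD_of_nonneg adds _ (by omega)]
          rw [sumFrom_pop adds ((i : Int) - k) (by omega) (by rw [hadds]; omega)]
          rw [hw]
          have : (i : Int) - k + 1 = (i : Int) + 1 - k := by ring
          rw [this]; ring
        · rw [if_neg (by tauto), hact, if_pos hk1, hw]
          exact sumFrom_nonpos adds _ _ (by omega) (by omega)
      · rw [if_neg (by tauto), hact, if_neg hk1, hw]
        rw [sumFrom_ge adds _ (by rw [hadds]; omega)]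
    have hfd : PySem.Int.floordiv (p - m * w) m = PySem.Int.floordiv p m - w := by
      simp only [PySem.Int.floordiv]
      exact fdiv_sub_mul p w m hm
    set add : Int := PySem.Int.floordiv p m - w with hadd
    rw [solutionLoopA, solutionLoopB]
    simp only [hread, hfd, hactpost, ← hadd]
    have hip1 : ((i + 1 : Nat) : Int) = (i : Int) + 1 := by push_cast; ring
    by_cases hpos : add > 0
    · simp only [hpos, true_and]
      have hmax : max add 0 = add := by omega
      rw [hmax]
      have happ := ih (i + 1)
        ((PySem.List.pyRange ((i : Int) + 1) (min n ((i : Int) + k)) 1).foldl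
          (fun acc j => PySem.List.pySetD acc j (PySem.List.pyGetD acc j 0 - add * m)) ps)
        (adds ++ [add]) (if k > 1 then w + add else w) (res + add) n
        (by simp at hn ⊢; omega)
        (by rw [innerA_length]; simp at hlen ⊢; omega)
        (by simp [hadds])
        (by
          intro d hd
          have e : i + 1 + d = i + (d + 1) := by omega
          rw [e, innerA_getD (min n ((i : Int) + k)) (add * m) ((i : Int) + 1)
            (by omega) ps (i + (d + 1))]
          have hR := hrest (d + 1) (by simpa using hd)
          simp only [List.getD_cons_succ] at hR
          rw [hR, sumFrom_append, hadds]
          have hlt : i + (d + 1) < ps.length := by simp at hlen; omega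
          have hltn : ((i + (d + 1) : Nat) : Int) < n := by simp at hn; push_cast; omega
          have hidx : (i : Int) + ((d + 1 : Nat) : Int) + 1 - k = ((i + 1 : Nat) : Int) + (d : Int) + 1 - k := by
            push_cast; ring
          rw [hidx]
          by_cases hdk : ((i + 1 : Nat) : Int) + (d : Int) + 1 - k ≤ (i : Int)
          · rw [if_pos hdk, if_pos (show ((i : Int) + 1 ≤ ((i + (d + 1) : Nat) : Int) ∧
                ((i + (d + 1) : Nat) : Int) < min n ((i : Int) + k) ∧ i + (d + 1) < ps.length) from
                ⟨by push_cast; omega,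
                 lt_min_iff.mpr ⟨hltn, by push_cast at hdk ⊢; omega⟩, hlt⟩)]
            ring
          · rw [if_neg hdk, if_neg (show ¬ ((i : Int) + 1 ≤ ((i + (d + 1) : Nat) : Int) ∧
                ((i + (d + 1) : Nat) : Int) < min n ((i : Int) + k) ∧ i + (d + 1) < ps.length) from by
                rintro ⟨-, hb, -⟩
                have hbk := lt_of_lt_of_le hb (min_le_right n ((i : Int) + k))
                push_cast at hbk hdk; omega)]
            ring)
        (by
          by_cases hk1 : k > 1
          · have hww : sumFrom adds (((i + 1 : Nat) : Int) - k) = w := by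
              rw [hw, show ((i + 1 : Nat) : Int) - k = (i : Int) + 1 - k by push_cast; ring]
            rw [if_pos hk1, if_pos hk1, sumFrom_append, hadds,
              if_pos (by push_cast; omega), hww]
          · rw [if_neg hk1, if_neg hk1, hw,
              sumFrom_ge adds _ (by rw [hadds]; omega)])
      rw [hip1] at happ
      exact happ
    · simp only [hpos, false_and, if_false]
      have hmax : max add 0 = 0 := by omega
      rw [hmax]
      have happ := ih (i + 1) ps (adds ++ [(0 : Int)]) w res n
        (by simp at hn ⊢; omega)
        (by simp at hlen ⊢; omega)
        (by simp [hadds])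
        (by
          intro d hd
          have e : i + 1 + d = i + (d + 1) := by omega
          have hR := hrest (d + 1) (by simpa using hd)
          simp only [List.getD_cons_succ] at hR
          have hidx : (i : Int) + ((d + 1 : Nat) : Int) + 1 - k = ((i + 1 : Nat) : Int) + (d : Int) + 1 - k := by
            push_cast; ring
          rw [e, hR, hidx, sumFrom_append, ite_self, add_zero])
        (by
          by_cases hk1 : k > 1
          · have hww : sumFrom adds (((i + 1 : Nat) : Int) - k) = w := by
              rw [hw, show ((i + 1 : Nat) : Int) - k = (i : Int) + 1 - k by push_cast; ring]
            rw [if_pos hk1, sumFrom_append, ite_self, add_zero, hww]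
          · rw [if_neg hk1, hw,
              sumFrom_ge adds _ (by rw [hadds]; omega)])
      rw [hip1] at happ
      exact happ

-- ===== VERDICT (by name: the statement is the Claim_ definition above) =====
theorem solution_spec : Claim_equal_solution := by
  intro players m k _ hpre
  unfold Spec_solution
  rcases hpre with h | hm
  · subst h
    show solution [] m k = solution_alt [] m k
    simp only [solution, solution_alt, List.length_nil, Nat.cast_zero,
      PySem.List.pyRange_one_eq_nil (le_refl (0 : Int))]
    rfl
  · show solution players m k = solution_alt players m k
    simp only [solution, solution_alt]
    have h := main_loop m k hm players 0 players [] 0 0 (players.length)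
      (by simp) (by simp) rfl
      (by intro d hd; simp [sumFrom_nil])
      (by simp [sumFrom_nil])
    simpa using h
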